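-- pv_equiv track=rewrite | github.com/MrBrantCode/unitest_baseline | mut_generate/mist_train_cf/cf_51843/solution.py | extensive_sequence
-- ===== SOURCE A (Python) =====
-- def extensive_sequence(str_lst, char_limit):
--     result = []
--     aggregate_length = 0
--     for s in str_lst:
--         if aggregate_length + len(s) > char_limit:
--             break
--         aggregate_length += len(s)
--         result.append(s)
--     return result
-- ===== SOURCE B (Python) =====
-- from itertools import accumulate
-- from bisect import bisect_right
--
-- def extensive_sequence(str_lst, char_limit):
--     prefix = list(accumulate(map(len, str_lst)))
--     idx = bisect_right(prefix, char_limit)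
--     return str_lst[:idx]
-- ===== Notes on version B (the rewrite author's own statement) =====
-- stated objective: alternative
-- what changed: Replaces the accumulate-and-break loop with a prefix-sum table built once and a bisect_right binary search that finds the cutoff index, returning a slice.
import Mathlib
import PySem

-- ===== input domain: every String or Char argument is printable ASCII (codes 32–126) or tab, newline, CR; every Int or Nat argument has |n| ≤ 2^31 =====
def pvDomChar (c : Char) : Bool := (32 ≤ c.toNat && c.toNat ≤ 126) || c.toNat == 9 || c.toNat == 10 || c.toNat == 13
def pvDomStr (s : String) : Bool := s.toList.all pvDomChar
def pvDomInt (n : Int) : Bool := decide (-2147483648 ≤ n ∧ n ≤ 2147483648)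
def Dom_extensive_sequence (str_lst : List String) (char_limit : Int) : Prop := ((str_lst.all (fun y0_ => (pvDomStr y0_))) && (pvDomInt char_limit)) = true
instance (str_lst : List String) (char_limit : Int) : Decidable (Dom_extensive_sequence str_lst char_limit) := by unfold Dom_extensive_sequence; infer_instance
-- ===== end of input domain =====

-- B replaces A's accumulate-and-break loop by a prefix-sum table plus a bisect_right
-- binary search for the cutoff index, then a slice (alternative decomposition, same cost).

-- ===== PORT A =====
-- the for-loop with break: carries the running aggregate_length, stops at the first overflow
def pvALoop (char_limit : Int) : List String → Int → List String
  | [], _ => []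
  | s :: rest, agg =>
      if agg + (s.length : Int) > char_limit then []
      else s :: pvALoop char_limit rest (agg + (s.length : Int))

def extensive_sequence (str_lst : List String) (char_limit : Int) : List String :=
  pvALoop char_limit str_lst 0

-- ===== PORT B =====
-- list(accumulate(map(len, str_lst))) with running sum `acc`
def pvAccum : List String → Int → List Int
  | [], _ => []
  | s :: rest, acc => (acc + (s.length : Int)) :: pvAccum rest (acc + (s.length : Int))

-- bisect.bisect_right: lo=0, hi=len(a); while lo<hi: mid=(lo+hi)//2; if x<a[mid]: hi=mid else lo=mid+1
def pvBisect (a : List Int) (x : Int) (lo hi : Nat) : Nat :=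
  if _h : lo < hi then
    if x < a.getD ((lo + hi) / 2) 0 then pvBisect a x lo ((lo + hi) / 2)
    else pvBisect a x ((lo + hi) / 2 + 1) hi
  else lo
termination_by hi - lo
decreasing_by all_goals omega

def extensive_sequence_alt (str_lst : List String) (char_limit : Int) : List String :=
  let pref := pvAccum str_lst 0
  let idx := pvBisect pref char_limit 0 pref.length
  str_lst.take idx

-- ===== PRECONDITION & SPEC =====
def Spec_extensive_sequence (str_lst : List String) (char_limit : Int) (out : List String) : Prop := out = extensive_sequence_alt str_lst char_limit
instance (str_lst : List String) (char_limit : Int) (out : List String) : Decidable (Spec_extensive_sequence str_lst char_limit out) := by unfold Spec_extensive_sequence; infer_instance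

-- ===== CLAIM (what is proved, stated in full; the proofs are below) =====
def Claim_equal_extensive_sequence : Prop := ∀ (str_lst : List String) (char_limit : Int), Dom_extensive_sequence str_lst char_limit → Spec_extensive_sequence str_lst char_limit (extensive_sequence str_lst char_limit)

-- ===== LEMMAS AND PROOFS =====

theorem pvAccum_length (l : List String) (acc : Int) : (pvAccum l acc).length = l.length := by
  induction l generalizing acc with
  | nil => rfl
  | cons s rest ih => simp [pvAccum, ih]

theorem pvAccum_ge (l : List String) (acc : Int) : ∀ e ∈ pvAccum l acc, acc ≤ e := by
  induction l generalizing acc with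
  | nil => simp [pvAccum]
  | cons s rest ih =>
      intro e he
      simp only [pvAccum, List.mem_cons] at he
      rcases he with rfl | he
      · have : (0 : Int) ≤ (s.length : Int) := Int.natCast_nonneg _
        omega
      · have h1 := ih (acc + (s.length : Int)) e he
        have : (0 : Int) ≤ (s.length : Int) := Int.natCast_nonneg _
        omega

theorem pvAccum_mono (l : List String) (acc : Int) :
    ∀ i j, i ≤ j → j < (pvAccum l acc).length →
      (pvAccum l acc).getD i 0 ≤ (pvAccum l acc).getD j 0 := by
  induction l generalizing acc with
  | nil => intro i j _ hj; simp [pvAccum] at hj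
  | cons s rest ih =>
      intro i j hij hj
      simp only [pvAccum, List.length_cons] at hj ⊢
      cases i with
      | zero =>
          cases j with
          | zero => exact le_refl _
          | succ j' =>
              simp only [List.getD_cons_zero, List.getD_cons_succ]
              have hj' : j' < (pvAccum rest (acc + (s.length : Int))).length := by omega
              have hmem : (pvAccum rest (acc + (s.length : Int))).getD j' 0
                  ∈ pvAccum rest (acc + (s.length : Int)) := by
                rw [List.getD_eq_getElem _ _ hj']
                exact List.getElem_mem _
              exact pvAccum_ge _ _ _ hmem
      | succ i' =>
          cases j with
          | zero => omega
          | succ j' =>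
              simp only [List.getD_cons_succ]
              exact ih _ i' j' (by omega) (by omega)

theorem pvBisect_spec (a : List Int) (x : Int)
    (mono : ∀ i j, i ≤ j → j < a.length → a.getD i 0 ≤ a.getD j 0) :
    ∀ lo hi, lo ≤ hi → hi ≤ a.length →
      (∀ i, i < lo → a.getD i 0 ≤ x) →
      (∀ i, hi ≤ i → i < a.length → x < a.getD i 0) →
      (∀ i, i < pvBisect a x lo hi → a.getD i 0 ≤ x) ∧
      (∀ i, pvBisect a x lo hi ≤ i → i < a.length → x < a.getD i 0) := by
  intro lo hi
  induction lo, hi using pvBisect.induct a x with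
  | case1 lo hi h hx ih =>
      intro _ hha hl hh
      rw [pvBisect, dif_pos h, if_pos hx]
      have hmlt : (lo + hi) / 2 < a.length := by omega
      exact ih (by omega) (by omega) hl
        (fun i hmi hi' => lt_of_lt_of_le hx (mono _ i hmi hi'))
  | case2 lo hi h hx ih =>
      intro _ hha hl hh
      rw [pvBisect, dif_pos h, if_neg hx]
      have hmlt : (lo + hi) / 2 < a.length := by omega
      refine ih (by omega) hha (fun i hi' => ?_) hh
      have : a.getD i 0 ≤ a.getD ((lo + hi) / 2) 0 := mono i _ (by omega) hmlt
      omega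
  | case3 lo hi h =>
      intro hlh hha hl hh
      rw [pvBisect, dif_neg h]
      exact ⟨hl, fun i hi' hil => hh i (by omega) hil⟩

theorem pvALoop_eq_take (c : Int) :
    ∀ (l : List String) (acc : Int) (r : Nat),
      (∀ i, i < r → (pvAccum l acc).getD i 0 ≤ c) →
      (∀ i, r ≤ i → i < (pvAccum l acc).length → c < (pvAccum l acc).getD i 0) →
      pvALoop c l acc = l.take r := by
  intro l
  induction l with
  | nil => intro acc r _ _; simp [pvALoop]
  | cons s rest ih =>
      intro acc r hl hh
      cases r with
      | zero =>
          have h0 := hh 0 (by omega) (by simp [pvAccum, pvAccum_length])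
          simp only [pvAccum, List.getD_cons_zero] at h0
          simp [pvALoop, if_pos h0]
      | succ r' =>
          have h0 := hl 0 (by omega)
          simp only [pvAccum, List.getD_cons_zero] at h0
          have hnot : ¬ acc + (s.length : Int) > c := by omega
          simp only [pvALoop, if_neg hnot, List.take_succ_cons]
          congr 1
          refine ih (acc + (s.length : Int)) r' (fun i hi => ?_) (fun i hi hil => ?_)
          · have := hl (i + 1) (by omega)
            simpa [pvAccum] using this
          · have := hh (i + 1) (by omega) (by simp [pvAccum]; omega)
            simpa [pvAccum] using this

-- ===== VERDICT (by name: the statement is the Claim_ definition above) =====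
theorem extensive_sequence_spec : Claim_equal_extensive_sequence := by
  intro str_lst char_limit _
  unfold Spec_extensive_sequence extensive_sequence extensive_sequence_alt
  have hspec := pvBisect_spec (pvAccum str_lst 0) char_limit
    (pvAccum_mono str_lst 0) 0 (pvAccum str_lst 0).length
    (by omega) (le_refl _) (by omega) (by omega)
  exact pvALoop_eq_take char_limit str_lst 0 _ hspec.1 hspec.2
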